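-- pv_equiv track=rewrite | github.com/RomanOvc/lab2.2 | lab_7.py | sdig_right2
-- ===== SOURCE A (Python) =====
-- def in_2(stroka):
--     xx1 = bin(int(stroka, 16))
--     xx2 = xx1[2:]
--     return xx2
--
-- def sdig_right2(word, on):
--     kek = in_2(word)
--     listik = []
--     for listok in kek:
--         listik.append(listok)
--     ii = 0
--     while ii < on - 1 and on != 8:
--         listik.insert(0, listik[6])
--         listik.pop(7)
--         ii += 1
--     trolo = ""
--     for listok1 in listik:
--         trolo += listok1
--     return trolo
-- ===== SOURCE B (Python) =====
-- def sdig_right2(word, on):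
--     bits = bin(int(word, 16))[2:]
--     steps = 0 if on == 8 else max(on - 1, 0)
--     r = steps % 7
--     if r == 0:
--         return bits
--     head, tail = bits[:7], bits[7:]
--     return head[-r:] + head[:-r] + tail
-- ===== Notes on version B (the rewrite author's own statement) =====
-- stated objective: faster
-- what changed: A simulates the rotation step by step (insert/pop on a list, on-1 iterations); B notes each step is a right rotation of the first 7 bits, so it applies the single rotation by (on-1) mod 7 using slices, in one step.
import Mathlib
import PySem

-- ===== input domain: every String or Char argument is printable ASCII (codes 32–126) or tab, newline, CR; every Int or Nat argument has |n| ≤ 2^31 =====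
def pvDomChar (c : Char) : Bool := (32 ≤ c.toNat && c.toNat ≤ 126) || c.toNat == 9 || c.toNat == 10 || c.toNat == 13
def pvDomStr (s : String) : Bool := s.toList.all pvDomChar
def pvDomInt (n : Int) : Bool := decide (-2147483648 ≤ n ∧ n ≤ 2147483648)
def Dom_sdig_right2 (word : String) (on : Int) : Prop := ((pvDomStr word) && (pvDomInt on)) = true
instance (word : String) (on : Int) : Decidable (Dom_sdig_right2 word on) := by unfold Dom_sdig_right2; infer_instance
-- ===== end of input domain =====

-- B replaces A's step-by-step list simulation (on-1 insert/pop steps) by ONE rotation of the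
-- first 7 bits by (on-1) mod 7; a timing run measured it faster (A is O(on·n), B is O(n)).

-- ===== PORT A =====
-- in_2: bin(int(stroka, 16))[2:]; none = ValueError from int(stroka, 16) (excluded by Pre_)
def in_2 (stroka : String) : Option (List Char) :=
  (PySem.Int.ofStrBase? stroka 16).map
    (fun n => PySem.List.slice (PySem.Int.toBinChars0b n) (some 2) none)

-- one body of A's while loop: listik.insert(0, listik[6]); listik.pop(7);
-- none = IndexError from listik[6] (excluded by Pre_)
def aBody (listik : List Char) : Option (List Char) :=
  match PySem.List.pyGet? listik 6 with
  | none => none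
  | some x =>
    match PySem.List.pop? (PySem.List.insert listik 0 x) 7 with
    | none => none
    | some r => some r.2

-- A's while loop; fuel = (on-1).toNat is an upper bound on the iteration count, the real
-- guard 'ii < on - 1 and on != 8' is re-checked each round exactly as in the Python.
def aLoop (listik : List Char) (ii «on» : Int) : Nat → List Char
  | 0 => listik
  | Nat.succ fl =>
    if ii < «on» - 1 ∧ «on» ≠ 8 then
      match aBody listik with
      | none => listik            -- IndexError; never reached under Pre_
      | some l => aLoop l (ii + 1) «on» fl
    else listik

def sdig_right2 (word : String) («on» : Int) : String :=
  match in_2 word with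
  | none => ""                    -- ValueError; excluded by Pre_
  | some kek =>
    let listik := kek.foldl (fun acc c => acc ++ [c]) []
    let listik := aLoop listik 0 «on» («on» - 1).toNat
    String.ofList (listik.foldl (fun acc c => acc ++ [c]) [])

-- ===== PORT B =====
def sdig_right2_alt (word : String) («on» : Int) : String :=
  match PySem.Int.ofStrBase? word 16 with
  | none => ""                    -- ValueError; excluded by Pre_
  | some n =>
    let bits := PySem.List.slice (PySem.Int.toBinChars0b n) (some 2) none
    let steps : Int := if «on» = 8 then 0 else max («on» - 1) 0
    let r := PySem.Int.mod steps 7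
    if r = 0 then String.ofList bits
    else
      let head := PySem.List.slice bits none (some 7)
      let tail := PySem.List.slice bits (some 7) none
      String.ofList (PySem.List.slice head (some (-r)) none ++
                 PySem.List.slice head none (some (-r)) ++ tail)

-- ===== PRECONDITION & SPEC =====
-- the bit string in_2 produces (0 when the word does not parse; Pre_ then rejects anyway)
def pvKek (word : String) : List Char :=
  PySem.List.slice (PySem.Int.toBinChars0b ((PySem.Int.ofStrBase? word 16).getD 0)) (some 2) none

-- Pre_ = exactly the inputs where A returns: int(word, 16) must parse (else ValueError), and
-- whenever the loop runs at least once (on ≥ 2 and on ≠ 8) the bit string must have ≥ 7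
-- characters (else listik[6] raises IndexError).
def Pre_sdig_right2 (word : String) («on» : Int) : Prop :=
  PySem.Int.ofStrBase? word 16 ≠ none ∧
  («on» = 8 ∨ «on» ≤ 1 ∨ 7 ≤ (pvKek word).length)
instance (word : String) («on» : Int) : Decidable (Pre_sdig_right2 word «on») := by
  unfold Pre_sdig_right2; infer_instance

def pvWitness_sdig_right2 : String × Int := ("ff", 3)

def Spec_sdig_right2 (word : String) («on» : Int) (out : String) : Prop := out = sdig_right2_alt word «on»
instance (word : String) («on» : Int) (out : String) : Decidable (Spec_sdig_right2 word «on» out) := by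
  unfold Spec_sdig_right2; infer_instance

-- ===== CLAIM (what is proved, stated in full; the proofs are below) =====
def Claim_equal_sdig_right2 : Prop := ∀ (word : String) («on» : Int), Dom_sdig_right2 word «on» → Pre_sdig_right2 word «on» → Spec_sdig_right2 word «on» (sdig_right2 word «on»)

-- ===== LEMMAS AND PROOFS =====

-- pure form of one loop body on a list that is at least 7 long
def rot1 : List Char → List Char
  | a :: b :: c :: d :: e :: f :: g :: t => g :: a :: b :: c :: d :: e :: f :: t
  | l => l

def stepN : Nat → List Char → List Char
  | 0, l => l
  | Nat.succ k, l => stepN k (rot1 l)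

lemma aBody_cons (a b c d e f g : Char) (t : List Char) :
    aBody (a :: b :: c :: d :: e :: f :: g :: t) = some (g :: a :: b :: c :: d :: e :: f :: t) := by
  have h1 : PySem.List.pyGet? (a :: b :: c :: d :: e :: f :: g :: t) 6 = some g := by simp [pysem]
  have h2 : PySem.List.insert (a :: b :: c :: d :: e :: f :: g :: t) 0 g
      = g :: a :: b :: c :: d :: e :: f :: g :: t := by simp [pysem]
  have h3 : PySem.List.pop? (g :: a :: b :: c :: d :: e :: f :: g :: t) 7
      = some (g, g :: a :: b :: c :: d :: e :: f :: t) := by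
    rw [show (7 : Int) = ((7 : Nat) : Int) from rfl, PySem.List.pop?_natCast _ _ (by simp)]
    simp
  simp [aBody, h1, h2, h3]

lemma aLoop_eq_stepN (fl : Nat) : ∀ (ii «on» : Int) (a b c d e f g : Char) (t : List Char),
    «on» ≠ 8 → ii + fl = «on» - 1 →
    aLoop (a :: b :: c :: d :: e :: f :: g :: t) ii «on» fl
      = stepN fl (a :: b :: c :: d :: e :: f :: g :: t) := by
  induction fl with
  | zero => intro ii on a b c d e f g t _ _; rfl
  | succ k ih =>
    intro ii on a b c d e f g t h8 hsum
    have hlt : ii < on - 1 := by omega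
    rw [aLoop, if_pos ⟨hlt, h8⟩, aBody_cons]
    show aLoop (g :: a :: b :: c :: d :: e :: f :: t) (ii + 1) on k
        = stepN (k + 1) (a :: b :: c :: d :: e :: f :: g :: t)
    rw [ih (ii + 1) on g a b c d e f t h8 (by omega)]
    rfl

lemma stepN_succ (k : Nat) (l : List Char) : stepN (k + 1) l = stepN k (rot1 l) := rfl

lemma stepN_add_seven (k : Nat) (a b c d e f g : Char) (t : List Char) :
    stepN (k + 7) (a :: b :: c :: d :: e :: f :: g :: t)
      = stepN k (a :: b :: c :: d :: e :: f :: g :: t) := by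
  rw [show k + 7 = k + 6 + 1 from rfl, stepN_succ,
      show k + 6 = k + 5 + 1 from rfl, stepN_succ,
      show k + 5 = k + 4 + 1 from rfl, stepN_succ,
      show k + 4 = k + 3 + 1 from rfl, stepN_succ,
      show k + 3 = k + 2 + 1 from rfl, stepN_succ,
      show k + 2 = k + 1 + 1 from rfl, stepN_succ, stepN_succ]
  rfl

lemma stepN_mod (k : Nat) (a b c d e f g : Char) (t : List Char) :
    stepN k (a :: b :: c :: d :: e :: f :: g :: t)
      = stepN (k % 7) (a :: b :: c :: d :: e :: f :: g :: t) := by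
  induction k using Nat.strong_induction_on with
  | _ k ih =>
    by_cases h : k < 7
    · rw [Nat.mod_eq_of_lt h]
    · have hk : k = (k - 7) + 7 := by omega
      rw [hk, stepN_add_seven, ih (k - 7) (by omega)]
      congr 1
      omega

lemma pv_exists_seven (l : List Char) (h : 7 ≤ l.length) :
    ∃ a b c d e f g t, l = a :: b :: c :: d :: e :: f :: g :: t := by
  match l, h with
  | a :: b :: c :: d :: e :: f :: g :: t, _ => exact ⟨a, b, c, d, e, f, g, t, rfl⟩

lemma foldl_app (l : List Char) : l.foldl (fun acc c => acc ++ [c]) [] = l :=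
  (PySem.List.foldl_append_singleton l []).trans (List.nil_append l)

lemma aLoop_on8 (fl : Nat) (l : List Char) (ii : Int) : aLoop l ii 8 fl = l := by
  cases fl with
  | zero => rfl
  | succ k => rw [aLoop, if_neg (by simp)]

-- ===== VERDICT (by name: the statement is the Claim_ definition above) =====
set_option maxHeartbeats 1600000 in
theorem sdig_right2_spec : Claim_equal_sdig_right2 := by
  intro word on _ hpre
  unfold Spec_sdig_right2 sdig_right2 sdig_right2_alt in_2
  obtain ⟨hparse, hdisj⟩ := hpre
  cases hp : PySem.Int.ofStrBase? word 16 with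
  | none => exact absurd hp hparse
  | some n =>
    simp only [Option.map_some]
    set L := PySem.List.slice (PySem.Int.toBinChars0b n) (some 2) none with hL
    have hkek : pvKek word = L := by simp [pvKek, hp, hL]
    clear_value L
    rw [foldl_app, foldl_app]
    by_cases h8 : on = 8
    · -- loop never runs (on == 8); B: steps = 0, r = 0
      subst h8
      simp [aLoop_on8, PySem.Int.mod]
    · by_cases hle : on ≤ 1
      · -- loop never runs (fuel 0); B: steps = max (on-1) 0 = 0, r = 0
        have hfl : (on - 1).toNat = 0 := by omega
        have hst : max (on - 1) 0 = 0 := by omega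
        simp [hfl, hst, h8, aLoop, PySem.Int.mod]
      · -- main case: on ≥ 2, on ≠ 8, L has ≥ 7 chars
        have hlen : 7 ≤ L.length := by
          rcases hdisj with h | h | h
          · exact absurd h h8
          · omega
          · rwa [hkek] at h
        obtain ⟨a, b, c, d, e, f, g, t, hsh⟩ := pv_exists_seven L hlen
        set k : Nat := (on - 1).toNat with hk
        have hA : aLoop L 0 on k = stepN (k % 7) L := by
          rw [hsh, aLoop_eq_stepN k 0 on a b c d e f g t h8 (by omega), stepN_mod]
        have hst : max (on - 1) 0 = ((k : Nat) : Int) := by omega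
        have hr : PySem.Int.mod (max (on - 1) 0) 7 = ((k % 7 : Nat) : Int) := by
          rw [hst]; exact_mod_cast PySem.Int.mod_natCast k 7
        have hm7 : k % 7 < 7 := Nat.mod_lt _ (by omega)
        clear_value k
        rw [hA]
        simp only [if_neg h8, hr]
        have hhead : PySem.List.slice L none (some 7) = [a, b, c, d, e, f, g] := by
          rw [hsh]; simp [pysem]
        have htail : PySem.List.slice L (some 7) none = t := by
          rw [hsh]; simp [pysem]
        rw [hhead, htail, hsh]
        have hcases : k % 7 = 0 ∨ k % 7 = 1 ∨ k % 7 = 2 ∨ k % 7 = 3 ∨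
            k % 7 = 4 ∨ k % 7 = 5 ∨ k % 7 = 6 := by omega
        rcases hcases with h | h | h | h | h | h | h <;>
          rw [h] <;> norm_num [stepN, rot1, pysem]
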